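-- pv_equiv track=rewrite | github.com/Cloesick/dema-group | apps/dema-webshop/scripts/analyze_product_pdfs.py | detect_material_from_sku
-- ===== SOURCE A (Python) =====
-- from typing import Any, Dict, List, Optional, Sequence, Tuple
--
-- SKU_MATERIAL_MAP = {
--     # Messing fittings
--     "MF": ("messing", "Messing"),
--     "MFBU": ("messing", "Messing"),
--
--     # RVS fittings
--     "RVS": ("rvs", "RVS"),
--     "316": ("rvs-316", "RVS 316"),
--     "304": ("rvs-304", "RVS 304"),
--
--     # Verzinkt
--     "GB": ("verzinkt", "Verzinkt staal"),
--     "ZF": ("verzinkt", "Verzinkt staal"),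
--
--     # PVC
--     "DB": ("pvc", "PVC"),
--     "PB": ("pvc", "PVC"),
--     "PT": ("pvc", "PVC"),
--     "GF": ("pvc", "PVC"),
--
--     # PP
--     "PP": ("pp", "PP (Polypropyleen)"),
--     "BKL": ("pp", "PP (Polypropyleen)"),
--
--     # PE
--     "HDBU": ("hdpe", "HDPE"),
--     "LDBU": ("ldpe", "LDPE"),
--     "PE": ("pe", "PE (Polyethyleen)"),
--
--     # ABS
--     "ABS": ("abs", "ABS"),
--
--     # Aluminium
--     "AL": ("aluminium", "Aluminium"),
--
--     # Slangkoppelingen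
--     "GM": ("messing", "Messing"),
--     "GMI": ("rvs", "RVS/Inox"),
--     "C": ("aluminium", "Aluminium"),
--     "CI": ("rvs", "RVS 316"),
--     "VA": ("aluminium", "Aluminium"),
--     "VAI": ("rvs", "RVS/Inox"),
-- }
--
-- def detect_material_from_sku(sku: str) -> Optional[Tuple[str, str]]:
--     """Detect material from SKU prefix.
--
--     Returns:
--         Tuple of (material_slug, material_name) or None
--     """
--     if not sku:
--         return None
--
--     sku_upper = sku.upper()
--
--     # Try progressively shorter prefixes
--     for length in range(min(len(sku_upper), 6), 1, -1):
--         prefix = sku_upper[:length]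
--         if prefix in SKU_MATERIAL_MAP:
--             return SKU_MATERIAL_MAP[prefix]
--
--     return None
-- ===== SOURCE B (Python) =====
-- from typing import Optional, Tuple
--
-- # Prefix table organised per material: each material appears once with all of
-- # the SKU prefixes that denote it.
-- MATERIAL_PREFIXES = [
--     (("messing", "Messing"), ["MF", "MFBU", "GM"]),
--     (("rvs", "RVS"), ["RVS"]),
--     (("rvs-316", "RVS 316"), ["316"]),
--     (("rvs-304", "RVS 304"), ["304"]),
--     (("verzinkt", "Verzinkt staal"), ["GB", "ZF"]),
--     (("pvc", "PVC"), ["DB", "PB", "PT", "GF"]),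
--     (("pp", "PP (Polypropyleen)"), ["PP", "BKL"]),
--     (("hdpe", "HDPE"), ["HDBU"]),
--     (("ldpe", "LDPE"), ["LDBU"]),
--     (("pe", "PE (Polyethyleen)"), ["PE"]),
--     (("abs", "ABS"), ["ABS"]),
--     (("aluminium", "Aluminium"), ["AL", "C", "VA"]),
--     (("rvs", "RVS/Inox"), ["GMI", "VAI"]),
--     (("rvs", "RVS 316"), ["CI"]),
-- ]
--
-- def detect_material_from_sku(sku: str) -> Optional[Tuple[str, str]]:
--     """Detect material from SKU prefix: the longest table prefix the
--     uppercased SKU starts with wins."""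
--     if not sku:
--         return None
--     u = sku.upper()
--     best = None
--     best_len = 0
--     for material, prefixes in MATERIAL_PREFIXES:
--         for p in prefixes:
--             if len(p) > best_len and u.startswith(p):
--                 best, best_len = material, len(p)
--     return best
-- ===== Notes on version B (the rewrite author's own statement) =====
-- stated objective: alternative
-- what changed: Instead of generating successive prefixes of the SKU and probing the flat dict for each, B stores the table grouped per material (material -> list of prefixes) and does one nested scan keeping the longest prefix the uppercased SKU starts with.
-- intended difference: On non-empty SKUs whose uppercase starts with 'C' but not with 'CI', A returns None because its prefix loop range(min(len,6),1,-1) never tries length-1 prefixes so the map's 'C' -> aluminium entry is dead code, while B returns ('aluminium','Aluminium'), honouring every entry of the table as intended. — e.g. on detect_material_from_sku("c"): A returns none, B returns some ("aluminium", "Aluminium")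
import Mathlib
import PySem

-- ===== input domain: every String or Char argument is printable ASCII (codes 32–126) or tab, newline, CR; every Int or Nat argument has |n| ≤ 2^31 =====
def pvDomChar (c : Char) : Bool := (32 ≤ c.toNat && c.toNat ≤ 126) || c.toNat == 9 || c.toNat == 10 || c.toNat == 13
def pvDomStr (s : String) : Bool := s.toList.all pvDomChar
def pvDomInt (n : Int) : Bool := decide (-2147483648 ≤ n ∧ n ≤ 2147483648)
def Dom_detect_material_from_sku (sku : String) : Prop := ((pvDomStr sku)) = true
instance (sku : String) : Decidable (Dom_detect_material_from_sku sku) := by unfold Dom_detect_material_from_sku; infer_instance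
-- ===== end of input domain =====

-- B replaces A's probe-the-dict-by-generated-prefix loop with one nested scan over a
-- per-material prefix table keeping the longest matching prefix; on SKUs starting with
-- 'C' (but not 'CI') the two differ as stated in D_ below (A's loop dead-codes the 'C' key).


-- ===== PORT A =====
def skuPairs : List (String × (String × String)) :=
  [("MF", ("messing", "Messing")), ("MFBU", ("messing", "Messing")),
   ("RVS", ("rvs", "RVS")), ("316", ("rvs-316", "RVS 316")), ("304", ("rvs-304", "RVS 304")),
   ("GB", ("verzinkt", "Verzinkt staal")), ("ZF", ("verzinkt", "Verzinkt staal")),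
   ("DB", ("pvc", "PVC")), ("PB", ("pvc", "PVC")), ("PT", ("pvc", "PVC")), ("GF", ("pvc", "PVC")),
   ("PP", ("pp", "PP (Polypropyleen)")), ("BKL", ("pp", "PP (Polypropyleen)")),
   ("HDBU", ("hdpe", "HDPE")), ("LDBU", ("ldpe", "LDPE")), ("PE", ("pe", "PE (Polyethyleen)")),
   ("ABS", ("abs", "ABS")), ("AL", ("aluminium", "Aluminium")),
   ("GM", ("messing", "Messing")), ("GMI", ("rvs", "RVS/Inox")),
   ("C", ("aluminium", "Aluminium")), ("CI", ("rvs", "RVS 316")),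
   ("VA", ("aluminium", "Aluminium")), ("VAI", ("rvs", "RVS/Inox"))]

def skuMaterialMap : PySem.Dict String (String × String) := PySem.Dict.ofList skuPairs

-- 'for length in range(min(len, 6), 1, -1): if prefix in MAP: return MAP[prefix]'
def detectLoopA (u : String) : List Int → Option (String × String)
  | [] => none
  | L :: rest =>
      match PySem.Dict.get? skuMaterialMap (PySem.Str.slice u none (some L)) with
      | some v => some v
      | none => detectLoopA u rest

def detect_material_from_sku (sku : String) : Option (String × String) :=
  if sku = "" then none
  else
    let skuUpper := PySem.Str.upper sku
    detectLoopA skuUpper (PySem.List.pyRange (min (PySem.Str.len skuUpper) 6) 1 (-1))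

-- ===== PORT B =====
def materialPrefixes : List ((String × String) × List String) :=
  [(("messing", "Messing"), ["MF", "MFBU", "GM"]),
   (("rvs", "RVS"), ["RVS"]),
   (("rvs-316", "RVS 316"), ["316"]),
   (("rvs-304", "RVS 304"), ["304"]),
   (("verzinkt", "Verzinkt staal"), ["GB", "ZF"]),
   (("pvc", "PVC"), ["DB", "PB", "PT", "GF"]),
   (("pp", "PP (Polypropyleen)"), ["PP", "BKL"]),
   (("hdpe", "HDPE"), ["HDBU"]),
   (("ldpe", "LDPE"), ["LDBU"]),
   (("pe", "PE (Polyethyleen)"), ["PE"]),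
   (("abs", "ABS"), ["ABS"]),
   (("aluminium", "Aluminium"), ["AL", "C", "VA"]),
   (("rvs", "RVS/Inox"), ["GMI", "VAI"]),
   (("rvs", "RVS 316"), ["CI"])]

-- 'if len(p) > best_len and u.startswith(p): best, best_len = material, len(p)'
def scanPrefix (u : String) (st : Option (String × String) × Int) (mat : String × String)
    (p : String) : Option (String × String) × Int :=
  if PySem.Str.len p > st.2 ∧ PySem.Str.startswith u p = true then (some mat, PySem.Str.len p)
  else st

def detect_material_from_sku_alt (sku : String) : Option (String × String) :=
  if sku = "" then none
  else
    let u := PySem.Str.upper sku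
    (materialPrefixes.foldl
      (fun st row => row.2.foldl (fun st p => scanPrefix u st row.1 p) st) (none, 0)).1

-- ===== PRECONDITION & SPEC =====
-- On non-empty SKUs whose uppercase starts with "C" but not with "CI", A returns none because
-- its prefix loop never tries length-1 prefixes (so the map's "C" ↦ aluminium entry is dead
-- code), while B returns some ("aluminium", "Aluminium"), honouring every table entry as intended.
def D_detect_material_from_sku (sku : String) : Prop :=
  sku ≠ "" ∧ PySem.Str.startswith (PySem.Str.upper sku) "C" = true ∧
    PySem.Str.startswith (PySem.Str.upper sku) "CI" = false
instance (sku : String) : Decidable (D_detect_material_from_sku sku) := by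
  unfold D_detect_material_from_sku; infer_instance

def Spec_detect_material_from_sku (sku : String) (out : Option (String × String)) : Prop := ¬ D_detect_material_from_sku sku → out = detect_material_from_sku_alt sku
instance (sku : String) (out : Option (String × String)) : Decidable (Spec_detect_material_from_sku sku out) := by unfold Spec_detect_material_from_sku; infer_instance

def pvDiffWitness_detect_material_from_sku : String := "c"
def pvDiffWitnessOut_detect_material_from_sku : (Option (String × String)) × (Option (String × String)) :=
  (none, some ("aluminium", "Aluminium"))

-- ===== CLAIM (what is proved, stated in full; the proofs are below) =====
def Claim_unchanged_detect_material_from_sku : Prop := ∀ (sku : String), Dom_detect_material_from_sku sku → Spec_detect_material_from_sku sku (detect_material_from_sku sku)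
def Claim_changed_detect_material_from_sku : Prop := Dom_detect_material_from_sku (pvDiffWitness_detect_material_from_sku) ∧ D_detect_material_from_sku (pvDiffWitness_detect_material_from_sku) ∧ detect_material_from_sku (pvDiffWitness_detect_material_from_sku) = pvDiffWitnessOut_detect_material_from_sku.1 ∧ detect_material_from_sku_alt (pvDiffWitness_detect_material_from_sku) = pvDiffWitnessOut_detect_material_from_sku.2 ∧ pvDiffWitnessOut_detect_material_from_sku.1 ≠ pvDiffWitnessOut_detect_material_from_sku.2
def Claim_exact_detect_material_from_sku : Prop := ∀ (sku : String), Dom_detect_material_from_sku sku → D_detect_material_from_sku sku → detect_material_from_sku sku ≠ detect_material_from_sku_alt sku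

-- ===== LEMMAS AND PROOFS =====

-- the key of kv has length L and is a prefix of the (uppercased) SKU u
def swPred (u : List Char) (L : Nat) (kv : String × (String × String)) : Bool :=
  kv.1.toList.length == L && PySem.Chars.startswith u kv.1.toList

-- A's probe / B's per-length match at level L, as a find? over a key-first pair list
def mLvl (u : List Char) (L : Nat) : Option (String × String) :=
  (skuPairs.find? (swPred u L)).map (·.2)

-- B's table flattened to key-first pairs
def pairsB : List (String × (String × String)) :=
  materialPrefixes.flatMap (fun row => row.2.map (fun p => (p, row.1)))

def nLvl (u : List Char) (L : Nat) : Option (String × String) :=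
  (pairsB.find? (swPred u L)).map (·.2)

-- the state update of B's scan, with the (state-independent) startswith test factored out
def pick2 (st : Option (String × String) × Int) (q : String × (String × String)) :
    Option (String × String) × Int :=
  if st.2 < PySem.Str.len q.1 then (some q.2, PySem.Str.len q.1) else st

def lvl (L : Nat) (kv : String × (String × String)) : Bool := kv.1.toList.length == L

def chainF : Nat → List (String × (String × String)) → Option (String × (String × String))
  | 0, _ => none
  | N+1, l => (l.find? (lvl (N+1))).or (chainF N l)

def stOf (o : Option (String × (String × String))) : Option (String × String) × Int :=
  match o with
  | none => (none, 0)
  | some q => (some q.2, PySem.Str.len q.1)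

theorem chainF_nil (N : Nat) : chainF N [] = none := by
  induction N with
  | zero => rfl
  | succ n ih => simp [chainF, ih]

theorem chainF_some (N : Nat) (l : List (String × (String × String)))
    (b : String × (String × String)) (h : chainF N l = some b) :
    b.1.toList.length ≤ N := by
  induction N with
  | zero => simp [chainF] at h
  | succ n ih =>
      simp only [chainF] at h
      cases hf : l.find? (lvl (n+1)) with
      | some c =>
          rw [hf] at h
          simp only [Option.some_or, Option.some.injEq] at h
          have hc := List.find?_some hf
          simp only [lvl, beq_iff_eq] at hc
          subst h; omega
      | none =>
          rw [hf] at h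
          simp only [Option.none_or] at h
          have := ih h
          omega

theorem chainF_append_singleton (N : Nat) (l : List (String × (String × String)))
    (x : String × (String × String)) (h1 : 1 ≤ x.1.toList.length) (h2 : x.1.toList.length ≤ N) :
    chainF N (l ++ [x])
      = match chainF N l with
        | none => some x
        | some b => if b.1.toList.length < x.1.toList.length then some x else some b := by
  induction N with
  | zero => omega
  | succ n ih =>
      simp only [chainF, List.find?_append]
      by_cases hx : x.1.toList.length = n + 1
      · have hfx : List.find? (lvl (n+1)) [x] = some x :=
          List.find?_cons_of_pos (by simp only [lvl, beq_iff_eq]; exact hx)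
        cases hfl : l.find? (lvl (n+1)) with
        | some c =>
            have hc := List.find?_some hfl
            simp only [lvl, beq_iff_eq] at hc
            simp only [hfx, Option.some_or]
            rw [if_neg (by omega : ¬ c.1.toList.length < x.1.toList.length)]
        | none =>
            simp only [hfx, Option.none_or, Option.some_or]
            cases hcl : chainF n l with
            | none => simp
            | some b =>
                have hb := chainF_some n l b hcl
                rw [show (match some b with
                    | none => some x
                    | some b => if b.1.toList.length < x.1.toList.length then some x
                        else some b)
                  = if b.1.toList.length < x.1.toList.length then some x else some b from rfl]
                rw [if_pos (by omega : b.1.toList.length < x.1.toList.length)]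
      · have hfx : List.find? (lvl (n+1)) [x] = none := by
          rw [List.find?_cons_of_neg (by simp only [lvl, beq_iff_eq]; exact hx), List.find?_nil]
        cases hfl : l.find? (lvl (n+1)) with
        | some c =>
            have hc := List.find?_some hfl
            simp only [lvl, beq_iff_eq] at hc
            simp only [hfx, Option.some_or]
            rw [if_neg (by omega : ¬ c.1.toList.length < x.1.toList.length)]
        | none =>
            simp only [hfx, Option.none_or]
            exact ih (by omega)

theorem foldl_pick2_eq_chain (N : Nat) (l : List (String × (String × String)))
    (h : ∀ x ∈ l, 1 ≤ x.1.toList.length ∧ x.1.toList.length ≤ N) :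
    l.foldl pick2 (none, 0) = stOf (chainF N l) := by
  induction l using List.reverseRecOn with
  | nil => simp [chainF_nil, stOf]
  | append_singleton l x ih =>
      rw [List.foldl_append]
      simp only [List.foldl]
      rw [ih (fun y hy => h y (by simp [hy]))]
      have hx := h x (by simp)
      rw [chainF_append_singleton N l x hx.1 hx.2]
      cases hcl : chainF N l with
      | none =>
          simp only [stOf, pick2, PySem.Str.len]
          rw [if_pos (by exact_mod_cast (by omega : (0:Int) < (x.1.toList.length : Int)))]
      | some b =>
          simp only [stOf, pick2, PySem.Str.len]
          by_cases hlt : b.1.toList.length < x.1.toList.length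
          · rw [if_pos hlt, if_pos (by exact_mod_cast hlt)]
          · rw [if_neg hlt, if_neg (by exact_mod_cast hlt)]

-- A's dict probe at prefix length L equals the level-L find over the pair list
theorem getA (U : String) (L : Int) (h0 : 0 ≤ L) (hL : L.toNat ≤ U.toList.length) :
    PySem.Dict.get? skuMaterialMap (PySem.Str.slice U none (some L)) = mLvl U.toList L.toNat := by
  have hkey : (PySem.Str.slice U none (some L)).toList = U.toList.take L.toNat := by
    simp [PySem.Str.toList_slice, PySem.Chars.slice_eq_listSlice, PySem.List.slice_to _ h0]
  have hitems : skuMaterialMap.items = skuPairs := rfl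
  unfold PySem.Dict.get? mLvl
  rw [hitems]
  have hp : (fun p : String × (String × String) => p.1 == PySem.Str.slice U none (some L))
      = swPred U.toList L.toNat := by
    funext kv
    rw [Bool.eq_iff_iff]
    simp only [beq_iff_eq, swPred, Bool.and_eq_true, PySem.Chars.startswith_iff]
    constructor
    · intro h
      rw [h, hkey]
      refine ⟨?_, List.take_prefix _ _⟩
      rw [List.length_take]
      omega
    · rintro ⟨hlen, hpre⟩
      apply String.toList_inj.mp
      rw [hkey]
      rw [List.prefix_iff_eq_take] at hpre
      rw [hpre, hlen]
  rw [hp]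

theorem mLvl_none_of_gt (u : List Char) (L : Nat) (h : u.length < L) : mLvl u L = none := by
  have h0 : skuPairs.find? (swPred u L) = none := by
    apply List.find?_eq_none.mpr
    intro kv _
    simp only [swPred, Bool.and_eq_true, beq_iff_eq, PySem.Chars.startswith_iff]
    rintro ⟨hlen, hpre⟩
    have := hpre.length_le
    omega
  simp [mLvl, h0]

-- no key in the map is longer than 4
theorem mLvl_none_of_gt4 (u : List Char) (L : Nat) (h : 4 < L) : mLvl u L = none := by
  have hb : ∀ kv ∈ skuPairs, kv.1.toList.length ≤ 4 := by decide
  have h0 : skuPairs.find? (swPred u L) = none := by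
    apply List.find?_eq_none.mpr
    intro kv hm
    simp only [swPred, Bool.and_eq_true, beq_iff_eq]
    rintro ⟨hlen, _⟩
    have := hb kv hm
    omega
  simp [mLvl, h0]

theorem detectLoopA_cons (u : String) (L : Int) (rest : List Int) :
    detectLoopA u (L :: rest)
      = (PySem.Dict.get? skuMaterialMap (PySem.Str.slice u none (some L))).or
          (detectLoopA u rest) := by
  cases h : PySem.Dict.get? skuMaterialMap (PySem.Str.slice u none (some L)) <;>
    simp [detectLoopA, h]

-- A's loop equals the descending or-chain of level finds
theorem Aside (U : String) (h1 : 1 ≤ U.toList.length) :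
    detectLoopA U (PySem.List.pyRange (min (PySem.Str.len U) 6) 1 (-1))
    = (mLvl U.toList 6).or ((mLvl U.toList 5).or ((mLvl U.toList 4).or
        ((mLvl U.toList 3).or (mLvl U.toList 2)))) := by
  have hlen : PySem.Str.len U = (U.toList.length : Int) := rfl
  by_cases h6 : 6 ≤ U.toList.length
  · have hmin : min (PySem.Str.len U) 6 = 6 := by rw [hlen]; omega
    rw [hmin, show PySem.List.pyRange 6 1 (-1) = [6,5,4,3,2] from by decide,
        detectLoopA_cons, detectLoopA_cons, detectLoopA_cons, detectLoopA_cons, detectLoopA_cons,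
        getA U 6 (by omega) (by omega), getA U 5 (by omega) (by omega),
        getA U 4 (by omega) (by omega), getA U 3 (by omega) (by omega),
        getA U 2 (by omega) (by omega)]
    simp only [detectLoopA, Option.or_none]
    rfl
  · obtain ⟨n, hn⟩ : ∃ n, U.toList.length = n := ⟨_, rfl⟩
    rw [hn] at h1 h6
    rw [hlen, hn]
    interval_cases n
    · rw [show min ((1:Nat) : Int) 6 = 1 from by norm_num,
          show PySem.List.pyRange 1 1 (-1) = [] from by decide]
      rw [mLvl_none_of_gt _ 6 (by omega), mLvl_none_of_gt _ 5 (by omega),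
          mLvl_none_of_gt _ 4 (by omega), mLvl_none_of_gt _ 3 (by omega),
          mLvl_none_of_gt _ 2 (by omega)]
      rfl
    · rw [show min ((2:Nat) : Int) 6 = 2 from by norm_num,
          show PySem.List.pyRange 2 1 (-1) = [2] from by decide,
          detectLoopA_cons, getA U 2 (by omega) (by omega)]
      rw [mLvl_none_of_gt _ 6 (by omega), mLvl_none_of_gt _ 5 (by omega),
          mLvl_none_of_gt _ 4 (by omega), mLvl_none_of_gt _ 3 (by omega)]
      simp only [detectLoopA, Option.or_none, Option.none_or]
      rfl
    · rw [show min ((3:Nat) : Int) 6 = 3 from by norm_num,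
          show PySem.List.pyRange 3 1 (-1) = [3, 2] from by decide,
          detectLoopA_cons, detectLoopA_cons,
          getA U 3 (by omega) (by omega), getA U 2 (by omega) (by omega)]
      rw [mLvl_none_of_gt _ 6 (by omega), mLvl_none_of_gt _ 5 (by omega),
          mLvl_none_of_gt _ 4 (by omega)]
      simp only [detectLoopA, Option.or_none, Option.none_or]
      rfl
    · rw [show min ((4:Nat) : Int) 6 = 4 from by norm_num,
          show PySem.List.pyRange 4 1 (-1) = [4, 3, 2] from by decide,
          detectLoopA_cons, detectLoopA_cons, detectLoopA_cons,
          getA U 4 (by omega) (by omega), getA U 3 (by omega) (by omega),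
          getA U 2 (by omega) (by omega)]
      rw [mLvl_none_of_gt _ 6 (by omega), mLvl_none_of_gt _ 5 (by omega)]
      simp only [detectLoopA, Option.or_none, Option.none_or]
      rfl
    · rw [show min ((5:Nat) : Int) 6 = 5 from by norm_num,
          show PySem.List.pyRange 5 1 (-1) = [5, 4, 3, 2] from by decide,
          detectLoopA_cons, detectLoopA_cons, detectLoopA_cons, detectLoopA_cons,
          getA U 5 (by omega) (by omega), getA U 4 (by omega) (by omega),
          getA U 3 (by omega) (by omega), getA U 2 (by omega) (by omega)]
      rw [mLvl_none_of_gt _ 6 (by omega)]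
      simp only [detectLoopA, Option.or_none, Option.none_or]
      rfl

-- B's nested scan equals the descending or-chain of level finds over the flattened table
theorem Bside (U : String) :
    (materialPrefixes.foldl
      (fun st row => row.2.foldl (fun st p => scanPrefix U st row.1 p) st) (none, 0)).1
    = (nLvl U.toList 4).or ((nLvl U.toList 3).or ((nLvl U.toList 2).or (nLvl U.toList 1))) := by
  have hflat : ∀ (l : List ((String × String) × List String))
      (s : Option (String × String) × Int),
      l.foldl (fun st row => row.2.foldl (fun st p => scanPrefix U st row.1 p) st) s
        = (l.flatMap (fun row => row.2.map (fun p => (p, row.1)))).foldl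
            (fun st q => scanPrefix U st q.2 q.1) s := by
    intro l
    induction l with
    | nil => intro s; rfl
    | cons r t ih =>
        intro s
        simp only [List.foldl_cons, List.flatMap_cons, List.foldl_append, ih, List.foldl_map]
  rw [hflat]
  have hsplit : ∀ (st : Option (String × String) × Int) (q : String × (String × String)),
      scanPrefix U st q.2 q.1
        = if PySem.Str.startswith U q.1 = true then pick2 st q else st := by
    intro st q
    unfold scanPrefix pick2
    split_ifs <;> first | rfl | tauto
  simp only [hsplit]
  rw [PySem.List.foldl_ite_eq_foldl_filter]
  have hbnd : ∀ x ∈ (materialPrefixes.flatMap (fun row => row.2.map (fun p => (p, row.1)))),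
      1 ≤ x.1.toList.length ∧ x.1.toList.length ≤ 4 := by decide
  rw [foldl_pick2_eq_chain 4 _ ?bounds]
  case bounds =>
    intro x hx
    rw [List.mem_filter] at hx
    exact hbnd x hx.1
  have hexp : ∀ l : List (String × (String × String)), chainF 4 l =
      (l.find? (lvl 4)).or ((l.find? (lvl 3)).or ((l.find? (lvl 2)).or
        ((l.find? (lvl 1)).or none))) := by
    intro l; rfl
  have hfl : ∀ L : Nat,
      ((materialPrefixes.flatMap (fun row => row.2.map (fun p => (p, row.1)))).filter
          (fun q => decide (PySem.Str.startswith U q.1 = true))).find? (lvl L)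
        = pairsB.find? (swPred U.toList L) := by
    intro L
    rw [List.find?_filter]
    have hp : (fun a : String × (String × String) =>
        decide (decide (PySem.Str.startswith U a.1 = true) = true ∧ lvl L a = true))
        = swPred U.toList L := by
      funext kv
      rw [Bool.eq_iff_iff]
      simp [lvl, swPred, PySem.Str.startswith, and_comm]
    rw [hp]
    rfl
  cases hc : chainF 4 ((materialPrefixes.flatMap (fun row => row.2.map (fun p => (p, row.1)))).filter
      (fun q => decide (PySem.Str.startswith U q.1 = true))) with
  | none =>
      rw [hexp] at hc
      simp only [Option.or_eq_none_iff] at hc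
      simp only [stOf, nLvl, ← hfl, hc.1, hc.2.1, hc.2.2.1, hc.2.2.2.1, Option.map_none,
        Option.or_none]
  | some q =>
      simp only [stOf]
      rw [show (some q.2 : Option (String × String)) = (some q).map (·.2) from rfl, ← hc, hexp]
      simp only [nLvl, ← hfl, Option.map_or, Option.or_none]

-- find? agrees across two lists with the same members when matches are unique
theorem find?_eq_of_mem_iff {α : Type} (p : α → Bool) (l1 l2 : List α)
    (hm : ∀ x, x ∈ l1 ↔ x ∈ l2)
    (hu : ∀ x ∈ l1, ∀ y ∈ l1, p x = true → p y = true → x = y) :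
    l1.find? p = l2.find? p := by
  cases h1 : l1.find? p with
  | none =>
      symm
      apply List.find?_eq_none.mpr
      intro x hx
      exact List.find?_eq_none.mp h1 x ((hm x).mpr hx)
  | some a =>
      have ha1 : a ∈ l1 := List.mem_of_find?_eq_some h1
      have hpa : p a = true := List.find?_some h1
      cases h2 : l2.find? p with
      | none => exact absurd hpa (by simpa using List.find?_eq_none.mp h2 a ((hm a).mp ha1))
      | some b =>
          have hb2 : b ∈ l2 := List.mem_of_find?_eq_some h2
          have hpb : p b = true := List.find?_some h2
          exact congrArg some (hu a ha1 b ((hm b).mpr hb2) hpa hpb)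

-- at a fixed level the match is unique, so the two table orders find the same entry
theorem nLvl_eq_mLvl (u : List Char) (L : Nat) : nLvl u L = mLvl u L := by
  unfold nLvl mLvl
  refine congrArg (Option.map _) ?_
  symm
  apply find?_eq_of_mem_iff
  · have h12 : ∀ x ∈ skuPairs, x ∈ pairsB := by decide
    have h21 : ∀ x ∈ pairsB, x ∈ skuPairs := by decide
    exact fun x => ⟨h12 x, h21 x⟩
  · have hkey : ∀ x ∈ skuPairs, ∀ y ∈ skuPairs, x.1 = y.1 → x = y := by decide
    intro x hx y hy hpx hpy
    simp only [swPred, Bool.and_eq_true, beq_iff_eq, PySem.Chars.startswith_iff] at hpx hpy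
    apply hkey x hx y hy
    apply String.toList_inj.mp
    rw [List.prefix_iff_eq_take] at hpx hpy
    rw [hpx.2, hpy.2, hpx.1, hpy.1]

-- the only length-1 key is "C"
theorem mLvl_one_none (u : List Char) (hC : ¬ (['C'] <+: u)) : mLvl u 1 = none := by
  have hone : ∀ kv ∈ skuPairs, kv.1.toList.length = 1 → kv.1 = "C" := by decide
  have h0 : skuPairs.find? (swPred u 1) = none := by
    apply List.find?_eq_none.mpr
    intro kv hm
    simp only [swPred, Bool.and_eq_true, beq_iff_eq, PySem.Chars.startswith_iff]
    rintro ⟨hlen, hpre⟩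
    rw [hone kv hm hlen] at hpre
    exact hC hpre
  simp [mLvl, h0]

theorem mLvl_one_someC (u : List Char) (hC : ['C'] <+: u) :
    mLvl u 1 = some ("aluminium", "Aluminium") := by
  have hone : ∀ kv ∈ skuPairs, kv.1.toList.length = 1 → kv = ("C", ("aluminium", "Aluminium")) := by
    decide
  have hmem : ("C", ("aluminium", "Aluminium")) ∈ skuPairs := by decide
  have hp : swPred u 1 ("C", ("aluminium", "Aluminium")) = true := by
    simp [swPred, PySem.Chars.startswith_iff]
    exact hC
  have hs : (skuPairs.find? (swPred u 1)).isSome := by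
    rw [List.find?_isSome]
    exact ⟨_, hmem, hp⟩
  obtain ⟨x, hx⟩ := Option.isSome_iff_exists.mp hs
  have hx1 : x ∈ skuPairs := List.mem_of_find?_eq_some hx
  have hx2 := List.find?_some hx
  simp only [swPred, Bool.and_eq_true, beq_iff_eq] at hx2
  rw [mLvl, hx, hone x hx1 hx2.1]
  rfl

-- a matching key of length ≥ 2 would have to start with 'C', hence be "CI"
theorem mLvl_none_of_C (u : List Char) (L : Nat) (h2 : 2 ≤ L)
    (hC : ['C'] <+: u) (hCI : ¬ (['C', 'I'] <+: u)) : mLvl u L = none := by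
  have hCkeys : ∀ kv ∈ skuPairs, 2 ≤ kv.1.toList.length →
      kv.1.toList.head? = some 'C' → kv.1 = "CI" := by decide
  have h0 : skuPairs.find? (swPred u L) = none := by
    apply List.find?_eq_none.mpr
    intro kv hm
    simp only [swPred, Bool.and_eq_true, beq_iff_eq, PySem.Chars.startswith_iff]
    rintro ⟨hlen, hpre⟩
    have hne : kv.1.toList ≠ [] := by
      intro h
      rw [h] at hlen
      simp at hlen
      omega
    have hhead : kv.1.toList.head? = u.head? := by
      obtain ⟨t, ht⟩ := hpre
      rw [← ht]
      cases hkl : kv.1.toList with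
      | nil => exact absurd hkl hne
      | cons a l => rfl
    have huC : u.head? = some 'C' := by
      obtain ⟨t, rfl⟩ := hC
      rfl
    have hkv : kv.1 = "CI" := hCkeys kv hm (by omega) (by rw [hhead, huC])
    apply hCI
    have : kv.1.toList = ['C', 'I'] := by rw [hkv]; decide
    rw [this] at hpre
    exact hpre
  simp [mLvl, h0]

theorem sw_iff (s : String) (p : String) :
    PySem.Str.startswith s p = true ↔ p.toList <+: s.toList := by
  simp [PySem.Str.startswith, PySem.Chars.startswith_iff]

theorem upper_len (sku : String) (hs : sku ≠ "") :
    1 ≤ (PySem.Str.upper sku).toList.length := by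
  have hne : sku.toList ≠ [] := by simpa using hs
  have hu : (PySem.Str.upper sku).toList.length = sku.toList.length := by
    simp [PySem.Str.toList_upper, PySem.Chars.upper]
  rw [hu]
  exact List.length_pos_iff.mpr hne

-- ===== VERDICT (by name: the statement is the Claim_ definition above) =====
theorem detect_material_from_sku_spec : Claim_unchanged_detect_material_from_sku := by
  intro sku _ hnD
  show detect_material_from_sku sku = detect_material_from_sku_alt sku
  unfold detect_material_from_sku detect_material_from_sku_alt
  by_cases hs : sku = ""
  · rw [if_pos hs, if_pos hs]
  · rw [if_neg hs, if_neg hs]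
    rw [Aside (PySem.Str.upper sku) (upper_len sku hs), Bside (PySem.Str.upper sku)]
    rw [mLvl_none_of_gt4 _ 6 (by omega), mLvl_none_of_gt4 _ 5 (by omega)]
    simp only [Option.none_or]
    rw [nLvl_eq_mLvl, nLvl_eq_mLvl, nLvl_eq_mLvl, nLvl_eq_mLvl]
    have hD : ¬ (PySem.Str.startswith (PySem.Str.upper sku) "C" = true ∧
        PySem.Str.startswith (PySem.Str.upper sku) "CI" = false) := by
      intro h
      exact hnD ⟨hs, h.1, h.2⟩
    by_cases hC : PySem.Str.startswith (PySem.Str.upper sku) "C" = true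
    · have hCI : PySem.Str.startswith (PySem.Str.upper sku) "CI" = true := by
        cases hci : PySem.Str.startswith (PySem.Str.upper sku) "CI" with
        | false => exact absurd ⟨hC, hci⟩ hD
        | true => rfl
      have hpre : ("CI" : String).toList <+: (PySem.Str.upper sku).toList :=
        (sw_iff _ _).mp hCI
      have hp2 : swPred (PySem.Str.upper sku).toList 2 ("CI", ("rvs", "RVS 316")) = true := by
        simp only [swPred, Bool.and_eq_true, beq_iff_eq, PySem.Chars.startswith_iff]
        exact ⟨by decide, hpre⟩
      have hs2 : (skuPairs.find? (swPred (PySem.Str.upper sku).toList 2)).isSome := by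
        rw [List.find?_isSome]
        exact ⟨_, by decide, hp2⟩
      obtain ⟨v, hv⟩ := Option.isSome_iff_exists.mp hs2
      have hm2 : mLvl (PySem.Str.upper sku).toList 2 = some v.2 := by
        rw [mLvl, hv]
        rfl
      rw [hm2]
      simp only [Option.some_or]
    · have hnC : ¬ (['C'] <+: (PySem.Str.upper sku).toList) := by
        intro h
        apply hC
        apply (sw_iff _ _).mpr
        simpa using h
      rw [mLvl_one_none _ hnC]
      simp only [Option.or_none]

set_option maxRecDepth 20000 in
theorem detect_material_from_sku_changed : Claim_changed_detect_material_from_sku := by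
  unfold Claim_changed_detect_material_from_sku; decide

theorem detect_material_from_sku_tight : Claim_exact_detect_material_from_sku := by
  intro sku _ hD
  obtain ⟨hs, hC, hCI⟩ := hD
  unfold detect_material_from_sku detect_material_from_sku_alt
  rw [if_neg hs, if_neg hs]
  rw [Aside (PySem.Str.upper sku) (upper_len sku hs), Bside (PySem.Str.upper sku)]
  have hCp : ['C'] <+: (PySem.Str.upper sku).toList := by
    have := (sw_iff _ "C").mp hC
    simpa using this
  have hCIp : ¬ (['C', 'I'] <+: (PySem.Str.upper sku).toList) := by
    intro h
    have : PySem.Str.startswith (PySem.Str.upper sku) "CI" = true := by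
      apply (sw_iff _ _).mpr
      simpa using h
    rw [hCI] at this
    exact absurd this (by simp)
  rw [nLvl_eq_mLvl, nLvl_eq_mLvl, nLvl_eq_mLvl, nLvl_eq_mLvl]
  rw [mLvl_none_of_gt4 _ 6 (by omega), mLvl_none_of_gt4 _ 5 (by omega),
      mLvl_none_of_C _ 4 (by omega) hCp hCIp, mLvl_none_of_C _ 3 (by omega) hCp hCIp,
      mLvl_none_of_C _ 2 (by omega) hCp hCIp, mLvl_one_someC _ hCp]
  simp
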